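-- pv_equiv track=rewrite | github.com/mingluzhao/Perceptual-Grouping | src/functionWarGameSevenGrid.py | transformPolicyToSoldierMove
-- ===== SOURCE A (Python) =====
-- def transformPolicyToSoldierMove(policy):
--     policy = list(policy)
--     soldierMove = [0 for i in range(len(policy))]
--     if policy.count(1) >0:
--         index = policy.index(1)
--
--         for i in range(len(policy)):
--             if i < index:
--                 soldierMove[i] = 1
--             if i == index:
--                 soldierMove[i] = 0
--             if i > index:
--                 soldierMove[i] = -1
--         return soldierMove
--     else:
--         return soldierMove
-- ===== SOURCE B (Python) =====
-- def transformPolicyToSoldierMove(policy):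
--     policy = list(policy)
--     out = []
--     seen = False
--     for x in policy:
--         if seen:
--             out.append(-1)
--         elif x == 1:
--             out.append(0)
--             seen = True
--         else:
--             out.append(1)
--     return out if seen else [0] * len(policy)
-- ===== Notes on version B (the rewrite author's own statement) =====
-- stated objective: alternative
-- what changed: Replaces A's count()/index() searches plus a per-index loop with three comparisons against the found index by a single forward scan with a boolean state flag that appends 1 before the first 1, 0 at it and -1 after, falling back to the zero list when no 1 was seen.
import Mathlib
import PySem

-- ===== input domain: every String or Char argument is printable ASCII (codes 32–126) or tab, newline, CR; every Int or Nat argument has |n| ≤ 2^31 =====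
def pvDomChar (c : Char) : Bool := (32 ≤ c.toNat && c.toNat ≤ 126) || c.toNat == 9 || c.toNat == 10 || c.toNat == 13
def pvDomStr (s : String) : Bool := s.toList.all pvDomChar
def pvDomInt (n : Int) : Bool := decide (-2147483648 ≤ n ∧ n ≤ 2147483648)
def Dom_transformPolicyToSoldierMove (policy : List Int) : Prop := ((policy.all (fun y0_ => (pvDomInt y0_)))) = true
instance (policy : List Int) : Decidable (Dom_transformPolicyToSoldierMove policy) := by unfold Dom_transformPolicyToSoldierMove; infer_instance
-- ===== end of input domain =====

-- B replaces A's count()/index() searches plus per-index comparison loop by a single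
-- forward scan with a boolean seen-flag state machine; alternative decomposition, same O(n) cost.
-- ===== PORT A =====
def transformPolicyToSoldierMove (policy : List Int) : List Int :=
  let n : Int := PySem.List.len policy
  let soldierMove : List Int := (PySem.List.pyRange 0 n 1).map (fun _ => (0 : Int))
  if PySem.List.count policy 1 > 0 then
    match PySem.List.index? policy 1 with
    | some index =>
        (PySem.List.pyRange 0 n 1).foldl (fun sm i =>
          let sm := if i < (index : Int) then PySem.List.pySetD sm i 1 else sm
          let sm := if i = (index : Int) then PySem.List.pySetD sm i 0 else sm
          let sm := if i > (index : Int) then PySem.List.pySetD sm i (-1) else sm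
          sm) soldierMove
    | none => soldierMove  -- unreachable: count policy 1 > 0 guarantees 1 ∈ policy
  else
    soldierMove

-- ===== PORT B =====
-- the body of Source B's for-loop: state = (output so far, whether the first 1 was seen)
def pvStep (st : List Int × Bool) (x : Int) : List Int × Bool :=
  if st.2 then (st.1 ++ [(-1 : Int)], true)
  else if x = 1 then (st.1 ++ [(0 : Int)], true)
  else (st.1 ++ [(1 : Int)], false)

def transformPolicyToSoldierMove_alt (policy : List Int) : List Int :=
  let st := policy.foldl pvStep ([], false)
  if st.2 then st.1 else List.replicate policy.length 0

-- ===== PRECONDITION & SPEC =====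
def Spec_transformPolicyToSoldierMove (policy : List Int) (out : List Int) : Prop := out = transformPolicyToSoldierMove_alt policy
instance (policy : List Int) (out : List Int) : Decidable (Spec_transformPolicyToSoldierMove policy out) := by unfold Spec_transformPolicyToSoldierMove; infer_instance

-- ===== CLAIM (what is proved, stated in full; the proofs are below) =====
def Claim_equal_transformPolicyToSoldierMove : Prop := ∀ (policy : List Int), Dom_transformPolicyToSoldierMove policy → Spec_transformPolicyToSoldierMove policy (transformPolicyToSoldierMove policy)

-- ===== LEMMAS AND PROOFS =====

/-- After the first 1 was seen, the scan only appends -1. -/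
lemma pvStep_foldl_seen (xs : List Int) : ∀ (acc : List Int),
    xs.foldl pvStep (acc, true) = (acc ++ List.replicate xs.length (-1), true) := by
  induction xs with
  | nil => intro acc; simp
  | cons x xs ih =>
      intro acc
      rw [List.foldl_cons]
      show xs.foldl pvStep (acc ++ [(-1 : Int)], true) = _
      rw [ih]
      simp [List.replicate_succ]

/-- The scan from an unseen state appends the three-segment tail at the first 1
    (all 1s and state still unseen when 1 ∉ xs). -/
lemma pvStep_foldl_unseen (xs : List Int) : ∀ (acc : List Int),
    xs.foldl pvStep (acc, false) =
      match PySem.List.index? xs 1 with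
      | some i => (acc ++ (List.replicate i 1 ++ [(0 : Int)] ++ List.replicate (xs.length - i - 1) (-1)), true)
      | none => (acc ++ List.replicate xs.length 1, false) := by
  induction xs with
  | nil => intro acc; simp [PySem.List.index?]
  | cons x xs ih =>
      intro acc
      by_cases hx : x = 1
      · subst hx
        rw [PySem.List.index?_cons_self, List.foldl_cons]
        show xs.foldl pvStep (acc ++ [(0 : Int)], true) = _
        rw [pvStep_foldl_seen]
        simp
      · have hstep : pvStep (acc, false) x = (acc ++ [(1 : Int)], false) := by
          simp [pvStep, hx]
        rw [PySem.List.index?_cons_of_ne xs hx, List.foldl_cons, hstep, ih]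
        cases PySem.List.index? xs 1 with
        | none => simp [List.replicate_succ]
        | some i => simp [List.replicate_succ]

/-- Folding `set` along `List.range m` with position-dependent values rewrites the first `m` entries. -/
lemma foldl_set_range (g : Nat → Int) :
    ∀ (m : Nat) (l0 : List Int), m ≤ l0.length →
      (List.range m).foldl (fun sm k => sm.set k (g k)) l0
        = (List.range m).map g ++ l0.drop m := by
  intro m
  induction m with
  | zero => intro l0 _; simp
  | succ m ih =>
      intro l0 hm
      rw [List.range_succ, List.foldl_append, List.foldl_cons, List.foldl_nil,
        ih l0 (by omega), List.map_append]
      have hlen : ((List.range m).map g).length = m := by simp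
      have hdrop : l0.drop m = l0[m] :: l0.drop (m + 1) :=
        List.drop_eq_getElem_cons (by omega)
      rw [hdrop, List.set_append_right _ _ (by omega), hlen, Nat.sub_self,
        List.set_cons_zero, List.append_assoc]
      simp

/-- The piecewise map over `range N` is the three-segment concatenation. -/
lemma map_range_piecewise (N index : Nat) (h : index < N) :
    (List.range N).map (fun k =>
        if k < index then (1 : Int) else if k = index then 0 else -1)
      = List.replicate index 1 ++ [(0 : Int)] ++ List.replicate (N - index - 1) (-1) := by
  apply List.ext_getElem
  · simp; omega
  · intro i h1 h2
    simp only [List.getElem_map, List.getElem_range]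
    rcases lt_trichotomy i index with hi | hi | hi
    · rw [List.getElem_append_left (by simpa using by omega),
        List.getElem_append_left (by simpa using hi)]
      simp [hi]
    · subst hi
      rw [List.getElem_append_left (by simp), List.getElem_append_right (by simp)]
      simp
    · rw [List.getElem_append_right (by simp; omega), List.getElem_replicate]
      split_ifs <;> omega

-- ===== VERDICT (by name: the statement is the Claim_ definition above) =====
theorem transformPolicyToSoldierMove_spec : Claim_equal_transformPolicyToSoldierMove := by
  intro policy _
  unfold Spec_transformPolicyToSoldierMove transformPolicyToSoldierMove transformPolicyToSoldierMove_alt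
  rw [pvStep_foldl_unseen]
  have hlen : PySem.List.len policy = ((policy.length : Nat) : Int) := by
    simp [PySem.List.len_eq]
  by_cases hmem : (1 : Int) ∈ policy
  · have hcnt : PySem.List.count policy 1 > 0 := by
      rw [PySem.List.count_eq]; exact List.count_pos_iff.mpr hmem
    obtain ⟨index, hidx⟩ := Option.isSome_iff_exists.mp
      ((PySem.List.index?_isSome_iff policy 1).mpr hmem)
    obtain ⟨hk, -, -⟩ := PySem.List.getElem_of_index?_eq_some hidx
    simp only [hidx, if_pos hcnt]
    rw [hlen, PySem.List.pyRange_zero_nat, List.foldl_map]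
    have key := foldl_set_range
      (fun k => if k < index then (1 : Int) else if k = index then 0 else -1)
      policy.length
      (List.map (fun _ => (0 : Int)) (List.map (fun k : Nat => (k : Int)) (List.range policy.length)))
      (by simp)
    refine (List.foldl_ext _ _ _ ?_).trans (key.trans ?_)
    · intro sm k _
      simp only [PySem.List.pySetD_natCast, gt_iff_lt]
      split_ifs <;> first | rfl | omega
    · rw [map_range_piecewise policy.length index hk]
      simp
  · have hcnt : ¬ PySem.List.count policy 1 > 0 := by
      rw [PySem.List.count_eq]; simp [List.count_eq_zero_of_not_mem hmem]
    have hidx : PySem.List.index? policy 1 = none :=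
      (PySem.List.index?_eq_none_iff policy 1).mpr hmem
    simp only [hidx, if_neg hcnt]
    rw [hlen, PySem.List.pyRange_zero_nat, List.map_map]
    simp [Function.comp_def, List.map_const']
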